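-- pv_equiv track=rewrite | github.com/eastmountaincode/oligo-design-tool | oligo_designer_v3_2026_04_15/backend/api.py | _find_repetitive_aa_regions
-- ===== SOURCE A (Python) =====
-- def _find_repetitive_aa_regions(
--     protein: str, k: int = 5, min_hits: int = 2,
-- ) -> list[tuple[int, int]]:
--     """Find contiguous residue ranges whose k-aa subsequences appear more
--     than once in the protein.
--
--     This is the general mechanism behind the "linker problem": any k-aa
--     motif that repeats forces the naive reverse translation to repeat at
--     the DNA level too, which (a) breaks dnachisel's k-mer uniqueness
--     constraint and (b) creates cross-hybridization between distant oligo
--     overlaps that land inside copies of the motif.  Detecting repeats at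
--     the AA level is sequence-agnostic — it catches canonical GGGGS
--     linkers, custom linkers, tandem repeats, and homologous framework
--     regions alike.
--
--     k = 5 aa ≈ 15 bp, which is comfortably above dnachisel's default
--     10-bp uniqueness window — so any flagged region really is one the
--     optimizer cannot untangle with codon swaps alone.
--
--     Returns a list of inclusive [start_aa, end_aa] ranges, merged.
--     """
--     n = len(protein)
--     if n < k:
--         return []
--     from collections import defaultdict
--     positions: dict[str, list[int]] = defaultdict(list)
--     for i in range(n - k + 1):
--         positions[protein[i:i + k]].append(i)
--     mask = [False] * n
--     for kmer, pos_list in positions.items():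
--         if len(pos_list) >= min_hits:
--             for p in pos_list:
--                 for j in range(p, min(p + k, n)):
--                     mask[j] = True
--     ranges: list[tuple[int, int]] = []
--     i = 0
--     while i < n:
--         if mask[i]:
--             j = i
--             while j < n and mask[j]:
--                 j += 1
--             ranges.append((i, j - 1))
--             i = j
--         else:
--             i += 1
--     return ranges
-- ===== SOURCE B (Python) =====
-- def _find_repetitive_aa_regions(
--     protein: str, k: int = 5, min_hits: int = 2,
-- ) -> list[tuple[int, int]]:
--     """Counter + single merging sweep: count every k-mer once, then walk the
--     start positions in order, merging touching/overlapping covered intervals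
--     on the fly -- no length-n boolean mask and no per-hit re-marking."""
--     n = len(protein)
--     if k < 1 or n < k:
--         return []
--     from collections import Counter
--     counts = Counter(protein[i:i + k] for i in range(n - k + 1))
--     ranges: list[tuple[int, int]] = []
--     cur = None  # current merged run (start, end), inclusive
--     for p in range(n - k + 1):
--         if counts[protein[p:p + k]] >= min_hits:
--             end = p + k - 1  # inclusive; p + k <= n always holds here
--             if cur is not None and p <= cur[1] + 1:
--                 cur = (cur[0], end)
--             else:
--                 if cur is not None:
--                     ranges.append(cur)
--                 cur = (p, end)
--     if cur is not None:
--         ranges.append(cur)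
--     return ranges
-- ===== Notes on version B (the rewrite author's own statement) =====
-- stated objective: alternative
-- what changed: Replaces the length-n boolean mask plus run-scan with a Counter of k-mers and a single ascending sweep over start positions that merges touching covered intervals on the fly.
import Mathlib
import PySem

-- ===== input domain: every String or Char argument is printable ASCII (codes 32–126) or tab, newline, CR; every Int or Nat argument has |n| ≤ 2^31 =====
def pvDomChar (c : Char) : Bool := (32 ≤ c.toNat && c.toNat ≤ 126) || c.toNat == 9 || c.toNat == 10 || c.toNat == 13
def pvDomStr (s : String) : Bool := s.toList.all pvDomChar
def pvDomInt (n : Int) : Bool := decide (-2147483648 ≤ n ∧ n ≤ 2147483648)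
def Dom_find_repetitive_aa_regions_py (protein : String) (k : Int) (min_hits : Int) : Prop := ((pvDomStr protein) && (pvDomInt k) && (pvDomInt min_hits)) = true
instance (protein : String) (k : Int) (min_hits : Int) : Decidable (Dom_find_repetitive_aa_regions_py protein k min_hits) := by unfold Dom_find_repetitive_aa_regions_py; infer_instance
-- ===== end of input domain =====

-- B replaces A's length-n boolean mask + run-scan by a k-mer Counter and one ascending
-- merging sweep over start positions (objective: alternative, same asymptotic cost).

-- protein[i:i+k] (used verbatim by both Pythons)
def pvKmer (cs : List Char) (k i : Int) : List Char := PySem.List.slice cs (some i) (some (i + k))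

-- ===== PORT A =====
-- inner 'while j < n and mask[j]: j += 1' (returns the final j; fuel only makes the loop
-- structurally total — it never runs out on the calls the port makes)
def pvInner (mask : List Bool) (n : Int) : Nat → Int → Int
  | 0, j => j
  | f + 1, j =>
    if j < n ∧ PySem.List.pyGetD mask j false = true then pvInner mask n f (j + 1) else j

-- outer 'while i < n: …' run scanner (same fuel discipline)
def pvScan (mask : List Bool) (n : Int) : Nat → Int → List (Int × Int) → List (Int × Int)
  | 0, _, acc => acc
  | f + 1, i, acc =>
    if i < n then
      if PySem.List.pyGetD mask i false = true then
        let j := pvInner mask n (n - i).toNat i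
        pvScan mask n f j (acc ++ [(i, j - 1)])
      else pvScan mask n f (i + 1) acc
    else acc

def find_repetitive_aa_regions_py (protein : String) (k : Int) (min_hits : Int) : List (Int × Int) :=
  let cs := protein.toList
  let n : Int := PySem.List.len cs
  if n < k then []
  else
    let positions : PySem.Dict (List Char) (List Int) :=
      (PySem.List.pyRange 0 (n - k + 1) 1).foldl
        (fun d i => d.modify (pvKmer cs k i) [] (fun l => l ++ [i])) PySem.Dict.empty
    let mask0 : List Bool := List.replicate n.toNat false
    let mask := positions.items.foldl
      (fun m kp =>
        if min_hits ≤ PySem.List.len kp.2 then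
          kp.2.foldl
            (fun m p => (PySem.List.pyRange p (min (p + k) n) 1).foldl
              (fun m j => PySem.List.pySetD m j true) m) m
        else m) mask0
    pvScan mask n (n.toNat + 1) 0 []

-- ===== PORT B =====
-- one sweep step: extend/flush the current merged run
def pvStep (k min_hits : Int) (counts : PySem.Dict (List Char) Int) (cs : List Char)
    (st : List (Int × Int) × Option (Int × Int)) (p : Int) : List (Int × Int) × Option (Int × Int) :=
  if min_hits ≤ counts.getD (pvKmer cs k p) 0 then
    let e := p + k - 1
    match st.2 with
    | some c => if p ≤ c.2 + 1 then (st.1, some (c.1, e)) else (st.1 ++ [c], some (p, e))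
    | none => (st.1, some (p, e))
  else st

def find_repetitive_aa_regions_py_alt (protein : String) (k : Int) (min_hits : Int) : List (Int × Int) :=
  let cs := protein.toList
  let n : Int := PySem.List.len cs
  if k < 1 ∨ n < k then []
  else
    let counts : PySem.Dict (List Char) Int :=
      PySem.Dict.counter ((PySem.List.pyRange 0 (n - k + 1) 1).map (fun i => pvKmer cs k i))
    let r := (PySem.List.pyRange 0 (n - k + 1) 1).foldl (pvStep k min_hits counts cs) ([], none)
    match r.2 with
    | some c => r.1 ++ [c]
    | none => r.1

-- ===== PRECONDITION & SPEC =====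
def Spec_find_repetitive_aa_regions_py (protein : String) (k : Int) (min_hits : Int) (out : List (Int × Int)) : Prop := out = find_repetitive_aa_regions_py_alt protein k min_hits
instance (protein : String) (k : Int) (min_hits : Int) (out : List (Int × Int)) : Decidable (Spec_find_repetitive_aa_regions_py protein k min_hits out) := by unfold Spec_find_repetitive_aa_regions_py; infer_instance

-- ===== CLAIM (what is proved, stated in full; the proofs are below) =====
def Claim_equal_find_repetitive_aa_regions_py : Prop := ∀ (protein : String) (k : Int) (min_hits : Int), Dom_find_repetitive_aa_regions_py protein k min_hits → Spec_find_repetitive_aa_regions_py protein k min_hits (find_repetitive_aa_regions_py protein k min_hits)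

-- ===== LEMMAS AND PROOFS =====

theorem pv_setAll_getD (J : List Int) (m : List Bool) (idx : Nat)
    (hb : ∀ j ∈ J, 0 ≤ j ∧ j < (m.length : Int)) :
    (J.foldl (fun m j => PySem.List.pySetD m j true) m).getD idx false
      = (m.getD idx false || decide ((idx : Int) ∈ J)) := by
  induction J generalizing m with
  | nil => simp
  | cons j J ih =>
    obtain ⟨hj0, hjl⟩ := hb j (List.mem_cons_self ..)
    rw [List.foldl_cons, ih]
    · rw [PySem.List.pySetD_of_nonneg m true hj0]
      by_cases h : (idx : Int) = j
      · have he : j.toNat = idx := by omega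
        subst he
        have hlt : j.toNat < m.length := by omega
        simp [List.getD, hlt]
        exact Or.inr (Or.inl hj0)
      · have hne : j.toNat ≠ idx := by omega
        simp [List.getD, hne, h]
    · intro x hx
      have := hb x (List.mem_cons_of_mem _ hx)
      simpa [PySem.List.length_pySetD] using this

theorem pv_setAll_length (J : List Int) (m : List Bool) :
    (J.foldl (fun m j => PySem.List.pySetD m j true) m).length = m.length := by
  induction J generalizing m with
  | nil => rfl
  | cons j J ih => simp [List.foldl_cons, ih, PySem.List.length_pySetD]

theorem pv_mid_getD (g : Int → List Int) (lst : List Int) (m : List Bool) (idx : Nat)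
    (hb : ∀ p ∈ lst, ∀ j ∈ g p, 0 ≤ j ∧ j < (m.length : Int)) :
    (lst.foldl (fun m p => (g p).foldl (fun m j => PySem.List.pySetD m j true) m) m).getD idx false
      = (m.getD idx false || decide (∃ p ∈ lst, (idx : Int) ∈ g p)) := by
  induction lst generalizing m with
  | nil => simp
  | cons p lst ih =>
    rw [List.foldl_cons, ih]
    · rw [pv_setAll_getD (g p) m idx (hb p (List.mem_cons_self ..))]
      by_cases h : (idx : Int) ∈ g p <;> simp [h]
    · intro q hq j hj
      have := hb q (List.mem_cons_of_mem _ hq) j hj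
      simpa [pv_setAll_length] using this

theorem pv_mid_length (g : Int → List Int) (lst : List Int) (m : List Bool) :
    (lst.foldl (fun m p => (g p).foldl (fun m j => PySem.List.pySetD m j true) m) m).length = m.length := by
  induction lst generalizing m with
  | nil => rfl
  | cons p lst ih => simp [List.foldl_cons, ih, pv_setAll_length]

theorem pv_outer_getD (k n min_hits : Int) (items : List (List Char × List Int))
    (m : List Bool) (idx : Nat)
    (hb : ∀ kp ∈ items, ∀ p ∈ kp.2, ∀ j ∈ PySem.List.pyRange p (min (p + k) n) 1, 0 ≤ j ∧ j < (m.length : Int)) :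
    (items.foldl (fun m kp => if min_hits ≤ PySem.List.len kp.2 then
        kp.2.foldl (fun m p => (PySem.List.pyRange p (min (p + k) n) 1).foldl (fun m j => PySem.List.pySetD m j true) m) m else m) m).getD idx false
      = (m.getD idx false || decide (∃ kp ∈ items, min_hits ≤ PySem.List.len kp.2 ∧ ∃ p ∈ kp.2, (idx : Int) ∈ PySem.List.pyRange p (min (p + k) n) 1)) := by
  induction items generalizing m with
  | nil => simp
  | cons kp items ih =>
    rw [List.foldl_cons, ih]
    · by_cases hc : min_hits ≤ PySem.List.len kp.2
      · rw [if_pos hc, pv_mid_getD (fun p => PySem.List.pyRange p (min (p + k) n) 1) kp.2 m idx (hb kp (List.mem_cons_self ..))]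
        by_cases h : ∃ p ∈ kp.2, (idx : Int) ∈ PySem.List.pyRange p (min (p + k) n) 1
        · have hiff : (∃ q ∈ kp :: items, min_hits ≤ PySem.List.len q.2 ∧ ∃ p ∈ q.2, (idx : Int) ∈ PySem.List.pyRange p (min (p + k) n) 1) := ⟨kp, List.mem_cons_self .., hc, h⟩
          rw [decide_eq_true h, decide_eq_true hiff]
          simp
        · have hiff : (∃ q ∈ kp :: items, min_hits ≤ PySem.List.len q.2 ∧ ∃ p ∈ q.2, (idx : Int) ∈ PySem.List.pyRange p (min (p + k) n) 1) ↔ (∃ q ∈ items, min_hits ≤ PySem.List.len q.2 ∧ ∃ p ∈ q.2, (idx : Int) ∈ PySem.List.pyRange p (min (p + k) n) 1) := by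
            constructor
            · rintro ⟨q, hq, hcq, hp⟩
              rcases List.mem_cons.1 hq with rfl | hq'
              · exact absurd hp h
              · exact ⟨q, hq', hcq, hp⟩
            · rintro ⟨q, hq, hcq, hp⟩
              exact ⟨q, List.mem_cons_of_mem _ hq, hcq, hp⟩
          rw [decide_eq_false h, decide_eq_decide.mpr hiff]
          · simp
          · infer_instance
      · rw [if_neg hc]
        have hiff : (∃ q ∈ kp :: items, min_hits ≤ PySem.List.len q.2 ∧ ∃ p ∈ q.2, (idx : Int) ∈ PySem.List.pyRange p (min (p + k) n) 1) ↔ (∃ q ∈ items, min_hits ≤ PySem.List.len q.2 ∧ ∃ p ∈ q.2, (idx : Int) ∈ PySem.List.pyRange p (min (p + k) n) 1) := by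
          constructor
          · rintro ⟨q, hq, hcq, hp⟩
            rcases List.mem_cons.1 hq with rfl | hq'
            · exact absurd hcq hc
            · exact ⟨q, hq', hcq, hp⟩
          · rintro ⟨q, hq, hcq, hp⟩
            exact ⟨q, List.mem_cons_of_mem _ hq, hcq, hp⟩
        rw [decide_eq_decide.mpr hiff]
    · intro q hq j hj x hx
      have := hb q (List.mem_cons_of_mem _ hq) j hj x hx
      split
      · simpa [pv_mid_length] using this
      · exact this

theorem pv_outer_length (k n min_hits : Int) (items : List (List Char × List Int)) (m : List Bool) :
    (items.foldl (fun m kp => if min_hits ≤ PySem.List.len kp.2 then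
        kp.2.foldl (fun m p => (PySem.List.pyRange p (min (p + k) n) 1).foldl (fun m j => PySem.List.pySetD m j true) m) m else m) m).length = m.length := by
  induction items generalizing m with
  | nil => rfl
  | cons kp items ih =>
    rw [List.foldl_cons, ih]
    split
    · rw [pv_mid_length]
    · rfl

theorem pv_pyGetD_getD (m : List Bool) (j : Int) (h0 : 0 ≤ j) (hl : j < (m.length : Int)) :
    PySem.List.pyGetD m j false = m.getD j.toNat false := by
  rw [PySem.List.pyGetD_eq_getElem m false h0 (by simpa using hl)]
  rw [List.getD_eq_getElem?_getD, List.getElem?_eq_getElem (by omega)]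
  rfl

theorem pv_getD_replicate (c : Nat) (idx : Nat) :
    (List.replicate c false).getD idx false = false := by
  rw [List.getD_eq_getElem?_getD, List.getElem?_replicate]
  split <;> rfl

-- inner while runs exactly to e+1
theorem pvInner_run (mask : List Bool) (n : Int) (e : Int) (he : e < n) :
    ∀ (fuel : Nat) (j : Int), (e + 1 - j).toNat ≤ fuel → j ≤ e + 1 →
      (∀ x : Int, j ≤ x → x ≤ e → PySem.List.pyGetD mask x false = true) →
      ¬ (e + 1 < n ∧ PySem.List.pyGetD mask (e + 1) false = true) →
      pvInner mask n fuel j = e + 1 := by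
  intro fuel
  induction fuel with
  | zero =>
    intro j hf hj hall hstop
    have hje : j = e + 1 := by omega
    subst hje
    rfl
  | succ f ih =>
    intro j hf hj hall hstop
    by_cases hje : j = e + 1
    · subst hje
      rw [pvInner, if_neg hstop]
    · have hjlt : j ≤ e := by omega
      have hmj := hall j le_rfl hjlt
      rw [pvInner, if_pos ⟨by omega, hmj⟩]
      exact ih (j + 1) (by omega) (by omega) (fun x hx1 hx2 => hall x (by omega) hx2) hstop

theorem pv_scan_eq (mask : List Bool) (n : Int) :
    ∀ (fuel : Nat) (i : Int) (acc L : List (Int × Int)),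
      (n - i).toNat < fuel →
      L.Pairwise (fun a b => a.2 + 1 < b.1) →
      (∀ r ∈ L, i ≤ r.1 ∧ r.1 ≤ r.2 ∧ r.2 < n) →
      (∀ j : Int, i ≤ j → j < n →
        (PySem.List.pyGetD mask j false = true ↔ ∃ r ∈ L, r.1 ≤ j ∧ j ≤ r.2)) →
      pvScan mask n fuel i acc = acc ++ L := by
  intro fuel
  induction fuel with
  | zero =>
    intro i acc L hf hsep hgood hmask
    omega
  | succ f ih =>
    intro i acc L hf hsep hgood hmask
    by_cases hin : i < n
    · by_cases hm : PySem.List.pyGetD mask i false = true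
      · -- mask[i] is true: L must start with a run beginning at i
        obtain ⟨r0, hr0mem, hr0a, hr0b⟩ := (hmask i le_rfl hin).1 hm
        rcases L with _ | ⟨⟨s, e⟩, rest⟩
        · simp at hr0mem
        · -- the containing interval is the head and s = i
          have hgh := hgood (s, e) (List.mem_cons_self ..)
          have hsi : s = i := by
            rcases List.mem_cons.1 hr0mem with rfl | hr'
            · simp at hr0a hr0b ⊢
              have := hgh.1
              omega
            · -- r0 in rest: contradiction with separation
              have hrel := (List.pairwise_cons.1 hsep).1 r0 hr'
              have hr0good := hgood r0 (List.mem_cons_of_mem _ hr')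
              simp at hrel
              omega
          subst hsi
          -- mask true on [s,e], false at e+1 (or e+1 = n)
          have htrue : ∀ x : Int, s ≤ x → x ≤ e → PySem.List.pyGetD mask x false = true := by
            intro x hx1 hx2
            exact (hmask x hx1 (by omega)).2 ⟨(s, e), List.mem_cons_self .., by simpa using hx1, by simpa using hx2⟩
          have hstop : ¬ (e + 1 < n ∧ PySem.List.pyGetD mask (e + 1) false = true) := by
            rintro ⟨hlt, htr⟩
            obtain ⟨r1, hr1mem, hr1a, hr1b⟩ := (hmask (e + 1) (by omega) hlt).1 htr
            rcases List.mem_cons.1 hr1mem with rfl | hr'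
            · simp at hr1a hr1b
            · have hrel := (List.pairwise_cons.1 hsep).1 r1 hr'
              simp at hrel
              omega
          have hinner : pvInner mask n (n - s).toNat s = e + 1 :=
            pvInner_run mask n e (by omega) (n - s).toNat s (by omega) (by omega) htrue hstop
          rw [pvScan, if_pos hin, if_pos hm]
          simp only [hinner]
          have hrec : pvScan mask n f (e + 1) (acc ++ [(s, e + 1 - 1)]) = (acc ++ [(s, e + 1 - 1)]) ++ rest := by
            apply ih (e + 1) _ rest (by omega) (List.pairwise_cons.1 hsep).2
            · intro r hr
              have hrel := (List.pairwise_cons.1 hsep).1 r hr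
              have := hgood r (List.mem_cons_of_mem _ hr)
              simp at hrel
              exact ⟨by omega, this.2⟩
            · intro j hj1 hj2
              rw [hmask j (by omega) hj2]
              constructor
              · rintro ⟨r, hrmem, hra, hrb⟩
                rcases List.mem_cons.1 hrmem with rfl | hr'
                · simp at hra hrb
                  omega
                · exact ⟨r, hr', hra, hrb⟩
              · rintro ⟨r, hrmem, hra, hrb⟩
                exact ⟨r, List.mem_cons_of_mem _ hrmem, hra, hrb⟩
          rw [hrec]
          simp
      · -- mask[i] is false: no interval starts at i
        rw [pvScan, if_pos hin, if_neg hm]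
        apply ih (i + 1) acc L (by omega) hsep
        · intro r hr
          have hg := hgood r hr
          have hne : r.1 ≠ i := by
            rintro h1
            exact hm ((hmask i le_rfl hin).2 ⟨r, hr, by omega, by omega⟩)
          exact ⟨by omega, hg.2⟩
        · intro j hj1 hj2
          exact hmask j (by omega) hj2
    · rw [pvScan, if_neg hin]
      rcases L with _ | ⟨r, rest⟩
      · simp
      · exact absurd ((hgood r (List.mem_cons_self ..))) (by omega)

def pvToL (st : List (Int × Int) × Option (Int × Int)) : List (Int × Int) :=
  st.1 ++ (match st.2 with | some c => [c] | none => [])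

theorem pv_sweep_inv (cs : List Char) (k min_hits : Int) (counts : PySem.Dict (List Char) Int)
    (hk : 1 ≤ k) : ∀ M : Nat,
    (pvToL ((PySem.List.pyRange 0 (M : Int) 1).foldl (pvStep k min_hits counts cs) ([], none))).Pairwise (fun a b => a.2 + 1 < b.1)
    ∧ (∀ r ∈ pvToL ((PySem.List.pyRange 0 (M : Int) 1).foldl (pvStep k min_hits counts cs) ([], none)), 0 ≤ r.1 ∧ r.1 ≤ r.2 ∧ r.2 ≤ (M : Int) + k - 2)
    ∧ (∀ j : Int, (∃ r ∈ pvToL ((PySem.List.pyRange 0 (M : Int) 1).foldl (pvStep k min_hits counts cs) ([], none)), r.1 ≤ j ∧ j ≤ r.2)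
        ↔ (∃ p : Int, 0 ≤ p ∧ p < (M : Int) ∧ min_hits ≤ counts.getD (pvKmer cs k p) 0 ∧ p ≤ j ∧ j < p + k))
    ∧ (((PySem.List.pyRange 0 (M : Int) 1).foldl (pvStep k min_hits counts cs) ([], none)).2 = none →
        ((PySem.List.pyRange 0 (M : Int) 1).foldl (pvStep k min_hits counts cs) ([], none)).1 = [])
    ∧ (∀ c, ((PySem.List.pyRange 0 (M : Int) 1).foldl (pvStep k min_hits counts cs) ([], none)).2 = some c →
        ∃ p', 0 ≤ p' ∧ p' < (M : Int) ∧ min_hits ≤ counts.getD (pvKmer cs k p') 0 ∧ c.1 ≤ p' ∧ c.2 = p' + k - 1) := by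
  intro M
  induction M with
  | zero =>
    rw [show ((0 : Nat) : Int) = 0 by norm_num, PySem.List.pyRange_one_eq_nil le_rfl]
    refine ⟨by simp [pvToL], by simp [pvToL], ?_, by simp, by simp⟩
    intro j
    simp [pvToL]
    omega
  | succ M ih =>
    obtain ⟨ihsep, ihgood, ihcov, ihnone, ihcur⟩ := ih
    have hsplit : PySem.List.pyRange 0 ((M + 1 : Nat) : Int) 1
        = PySem.List.pyRange 0 (M : Int) 1 ++ [(M : Int)] := by
      push_cast
      exact PySem.List.pyRange_one_succ_right (by positivity)
    rw [hsplit, List.foldl_append]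
    set st := (PySem.List.pyRange 0 (M : Int) 1).foldl (pvStep k min_hits counts cs) ([], none) with hst
    rw [List.foldl_cons, List.foldl_nil]
    by_cases hrep : min_hits ≤ counts.getD (pvKmer cs k (M : Int)) 0
    · cases hc : st.2 with
      | none =>
        -- cur is none: ranges empty, start a fresh run
        have h1 : st.1 = [] := ihnone hc
        have hstep : pvStep k min_hits counts cs st (M : Int) = ([], some ((M : Int), (M : Int) + k - 1)) := by
          simp [pvStep, hrep, hc, h1]
        rw [hstep]
        have hcovempty : ∀ p : Int, 0 ≤ p → p < (M : Int) → ¬ min_hits ≤ counts.getD (pvKmer cs k p) 0 := by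
          intro p hp0 hpM hr
          have : ∃ r ∈ pvToL st, r.1 ≤ p ∧ p ≤ r.2 := (ihcov p).2 ⟨p, hp0, hpM, hr, le_rfl, by omega⟩
          rw [pvToL, h1, hc] at this
          simp at this
        refine ⟨by simp [pvToL], ?_, ?_, by simp, ?_⟩
        · intro r hr
          simp [pvToL] at hr
          subst hr
          push_cast
          simp
          omega
        · intro j
          simp only [pvToL, List.nil_append, List.mem_singleton]
          constructor
          · rintro ⟨r, rfl, hra, hrb⟩
            exact ⟨(M : Int), by positivity, by push_cast; omega, hrep, by simpa using hra, by simp at hrb; omega⟩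
          · rintro ⟨p, hp0, hpM1, hr, hpj, hjp⟩
            by_cases hpM : p < (M : Int)
            · exact absurd hr (hcovempty p hp0 hpM)
            · have hpeq : p = (M : Int) := by push_cast at hpM1; omega
              exact ⟨_, rfl, by simp; omega, by simp; omega⟩
        · rintro c hcc
          simp at hcc
          exact ⟨(M : Int), by positivity, by push_cast; omega, hrep, by simp [← hcc], by simp [← hcc]⟩
      | some c =>
        obtain ⟨p', hp'0, hp'M, hp'rep, hp'c1, hp'c2⟩ := ihcur c hc
        have hcg := ihgood c (by rw [pvToL, hc]; simp)
        have hc12 : c.1 ≤ c.2 := hcg.2.1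
        have hc10 : 0 ≤ c.1 := hcg.1
        by_cases hmerge : (M : Int) ≤ c.2 + 1
        · -- extend the current run
          have hstep : pvStep k min_hits counts cs st (M : Int) = (st.1, some (c.1, (M : Int) + k - 1)) := by
            simp [pvStep, hrep, hc, hmerge]
          rw [hstep]
          have hsep1 : st.1.Pairwise (fun a b => a.2 + 1 < b.1) ∧ ∀ a ∈ st.1, a.2 + 1 < c.1 := by
            have hps := ihsep
            rw [pvToL, hc, List.pairwise_append] at hps
            exact ⟨hps.1, fun a ha => by simpa using hps.2.2 a ha⟩
          refine ⟨?_, ?_, ?_, by simp, ?_⟩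
          · rw [pvToL, List.pairwise_append]
            exact ⟨hsep1.1, by simp, by intro a ha b hb; simp at hb; subst hb; simpa using hsep1.2 a ha⟩
          · intro r hr
            simp only [pvToL, List.mem_append, List.mem_singleton] at hr
            rcases hr with hr1 | hr2
            · have := ihgood r (by rw [pvToL, hc]; exact List.mem_append_left _ hr1)
              push_cast
              exact ⟨this.1, this.2.1, by omega⟩
            · subst hr2
              push_cast
              simp
              omega
          · intro j
            simp only [pvToL, List.mem_append, List.mem_singleton]
            have hold := ihcov j
            rw [pvToL, hc] at hold
            simp only [List.mem_append, List.mem_singleton] at hold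
            constructor
            · rintro ⟨r, hr1 | hr2, hra, hrb⟩
              · obtain ⟨p, h1, h2, h3, h4, h5⟩ := hold.1 ⟨r, Or.inl hr1, hra, hrb⟩
                exact ⟨p, h1, by push_cast; omega, h3, h4, h5⟩
              · subst hr2
                simp at hra hrb
                by_cases hj : j ≤ c.2
                · obtain ⟨p, h1, h2, h3, h4, h5⟩ := hold.1 ⟨c, Or.inr rfl, hra, hj⟩
                  exact ⟨p, h1, by push_cast; omega, h3, h4, h5⟩
                · exact ⟨(M : Int), by positivity, by push_cast; omega, hrep, by omega, by omega⟩
            · rintro ⟨p, h1, h2, h3, h4, h5⟩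
              by_cases hpM : p < (M : Int)
              · obtain ⟨r, hr, hra, hrb⟩ := hold.2 ⟨p, h1, hpM, h3, h4, h5⟩
                rcases hr with hr1 | hr2
                · exact ⟨r, Or.inl hr1, hra, hrb⟩
                · rw [hr2] at hra hrb
                  exact ⟨(c.1, (M : Int) + k - 1), Or.inr rfl, by simpa using hra, by simp; omega⟩
              · have hpeq : p = (M : Int) := by push_cast at h2; omega
                exact ⟨(c.1, (M : Int) + k - 1), Or.inr rfl, by simp; omega, by simp; omega⟩
          · rintro c' hcc
            simp at hcc
            exact ⟨(M : Int), by positivity, by push_cast; omega, hrep, by simp [← hcc]; omega, by simp [← hcc]⟩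
        · -- flush current run, start a new one
          have hstep : pvStep k min_hits counts cs st (M : Int) = (st.1 ++ [c], some ((M : Int), (M : Int) + k - 1)) := by
            simp [pvStep, hrep, hc, hmerge]
          rw [hstep]
          have hallend : ∀ a ∈ pvToL st, a.2 + 1 < (M : Int) := by
            intro a ha
            rw [pvToL, hc] at ha
            rcases List.mem_append.1 ha with ha1 | ha2
            · have hps := ihsep
              rw [pvToL, hc, List.pairwise_append] at hps
              have hrel := hps.2.2 a ha1 c (by simp)
              omega
            · simp at ha2
              subst ha2
              omega
          refine ⟨?_, ?_, ?_, by simp, ?_⟩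
          · rw [pvToL, List.pairwise_append]
            have hps := ihsep
            rw [pvToL, hc] at hps
            refine ⟨by simpa using hps, by simp, ?_⟩
            intro a ha b hb
            simp at hb
            subst hb
            exact hallend a (by rw [pvToL, hc]; simpa using ha)
          · intro r hr
            simp only [pvToL, List.mem_append, List.mem_singleton] at hr
            rcases hr with (hr1 | hr2) | hr3
            · have := ihgood r (by rw [pvToL, hc]; exact List.mem_append_left _ hr1)
              push_cast
              exact ⟨this.1, this.2.1, by omega⟩
            · subst hr2
              push_cast
              exact ⟨hc10, hc12, by omega⟩
            · subst hr3
              push_cast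
              simp
              omega
          · intro j
            simp only [pvToL, List.mem_append, List.mem_singleton]
            have hold := ihcov j
            rw [pvToL, hc] at hold
            simp only [List.mem_append, List.mem_singleton] at hold
            constructor
            · rintro ⟨r, (hr1 | hr2) | hr3, hra, hrb⟩
              · obtain ⟨p, h1, h2, h3, h4, h5⟩ := hold.1 ⟨r, Or.inl hr1, hra, hrb⟩
                exact ⟨p, h1, by push_cast; omega, h3, h4, h5⟩
              · rw [hr2] at hra hrb
                obtain ⟨p, h1, h2, h3, h4, h5⟩ := hold.1 ⟨c, Or.inr rfl, hra, hrb⟩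
                exact ⟨p, h1, by push_cast; omega, h3, h4, h5⟩
              · subst hr3
                simp at hra hrb
                exact ⟨(M : Int), by positivity, by push_cast; omega, hrep, hra, by omega⟩
            · rintro ⟨p, h1, h2, h3, h4, h5⟩
              by_cases hpM : p < (M : Int)
              · obtain ⟨r, hr, hra, hrb⟩ := hold.2 ⟨p, h1, hpM, h3, h4, h5⟩
                rcases hr with hr1 | hr2
                · exact ⟨r, Or.inl (Or.inl hr1), hra, hrb⟩
                · rw [hr2] at hra hrb
                  exact ⟨c, Or.inl (Or.inr rfl), hra, hrb⟩
              · have hpeq : p = (M : Int) := by push_cast at h2; omega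
                exact ⟨((M : Int), (M : Int) + k - 1), Or.inr rfl, by simp; omega, by simp; omega⟩
          · rintro c' hcc
            simp at hcc
            exact ⟨(M : Int), by positivity, by push_cast; omega, hrep, by simp [← hcc], by simp [← hcc]⟩
    · -- k-mer not repeated: state unchanged
      have hstep : pvStep k min_hits counts cs st (M : Int) = st := by
        simp [pvStep, hrep]
      rw [hstep]
      refine ⟨ihsep, ?_, ?_, ihnone, ?_⟩
      · intro r hr
        have := ihgood r hr
        push_cast
        exact ⟨this.1, this.2.1, by omega⟩
      · intro j
        rw [ihcov j]
        constructor
        · rintro ⟨p, h1, h2, h3, h4, h5⟩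
          exact ⟨p, h1, by push_cast; omega, h3, h4, h5⟩
        · rintro ⟨p, h1, h2, h3, h4, h5⟩
          refine ⟨p, h1, ?_, h3, h4, h5⟩
          by_cases hpM : p < (M : Int)
          · exact hpM
          · have hpeq : p = (M : Int) := by push_cast at h2; omega
            rw [hpeq] at h3
            exact absurd h3 hrep
      · intro c hcc
        obtain ⟨p', h1, h2, h3, h4, h5⟩ := ihcur c hcc
        exact ⟨p', h1, by push_cast; omega, h3, h4, h5⟩

-- the positions dict maps each k-mer to the (ordered) list of its start indices
theorem pv_getD_positions (cs : List Char) (k : Int) (R : List Int) (w : List Char) :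
    (R.foldl (fun d i => d.modify (pvKmer cs k i) [] (fun l => l ++ [i])) PySem.Dict.empty).getD w []
      = R.filter (fun i => pvKmer cs k i == w) := by
  have h1 : R.foldl (fun d i => d.modify (pvKmer cs k i) [] (fun l => l ++ [i])) PySem.Dict.empty
      = (R.map (fun i => (pvKmer cs k i, i))).foldl (fun d p => d.modify p.1 [] (fun l => l ++ [p.2])) PySem.Dict.empty := by
    rw [List.foldl_map]
  rw [h1, PySem.Dict.getD_foldl_modify_append]
  rw [List.filter_map]
  simp [Function.comp_def]

theorem pv_nodup_positions (cs : List Char) (k : Int) (R : List Int) :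
    (R.foldl (fun d i => d.modify (pvKmer cs k i) [] (fun l => l ++ [i])) PySem.Dict.empty).keys.Nodup := by
  exact PySem.Dict.nodup_keys_foldl_modify_key R (fun i => pvKmer cs k i) []
    (fun d i => fun l => l ++ [i]) PySem.Dict.empty (by simp [PySem.Dict.keys_empty])

theorem pv_count_filter (cs : List Char) (k : Int) (R : List Int) (w : List Char) :
    (R.map (fun i => pvKmer cs k i)).count w = (R.filter (fun i => pvKmer cs k i == w)).length := by
  rw [List.count, List.countP_map, ← List.countP_eq_length_filter]
  rfl

-- the mask predicate of A equals the counter predicate of B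
theorem pv_maskpred (cs : List Char) (k min_hits : Int) (n : Int) (hn : n = (cs.length : Int))
    (idx : Int) :
    (∃ kp ∈ ((PySem.List.pyRange 0 (n - k + 1) 1).foldl (fun d i => d.modify (pvKmer cs k i) [] (fun l => l ++ [i])) PySem.Dict.empty).items,
        min_hits ≤ PySem.List.len kp.2 ∧ ∃ p ∈ kp.2, idx ∈ PySem.List.pyRange p (min (p + k) n) 1)
      ↔ (∃ p : Int, 0 ≤ p ∧ p < n - k + 1 ∧
          min_hits ≤ (PySem.Dict.counter ((PySem.List.pyRange 0 (n - k + 1) 1).map (fun i => pvKmer cs k i))).getD (pvKmer cs k p) 0 ∧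
          p ≤ idx ∧ idx < p + k) := by
  set R := PySem.List.pyRange 0 (n - k + 1) 1 with hR
  set pos := R.foldl (fun d i => d.modify (pvKmer cs k i) [] (fun l => l ++ [i])) PySem.Dict.empty with hpos
  have hcnt : ∀ w : List Char,
      (PySem.Dict.counter (R.map (fun i => pvKmer cs k i))).getD w 0 = ((R.filter (fun i => pvKmer cs k i == w)).length : Int) := by
    intro w
    rw [PySem.Dict.getD_counter, pv_count_filter]
  constructor
  · rintro ⟨kp, hkp, hlen, p, hp, hmem⟩
    have hval : kp.2 = R.filter (fun i => pvKmer cs k i == kp.1) := by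
      have h := PySem.Dict.getD_of_mem_items pos (show (kp.1, kp.2) ∈ pos.items from hkp)
        (pv_nodup_positions cs k R) []
      rw [pv_getD_positions] at h
      exact h.symm
    rw [hval] at hp
    have hp2 := List.mem_filter.1 hp
    have hkw : pvKmer cs k p = kp.1 := by simpa using hp2.2
    have hpR := PySem.List.mem_pyRange_one.1 hp2.1
    have hidx := PySem.List.mem_pyRange_one.1 hmem
    refine ⟨p, hpR.1, hpR.2, ?_, hidx.1, by omega⟩
    rw [hcnt, hkw]
    rw [← hval]
    simpa [PySem.List.len_eq] using hlen
  · rintro ⟨p, h0, h1, h3, h4, h5⟩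
    have hfil := pv_getD_positions cs k R (pvKmer cs k p)
    have hpR : p ∈ R := PySem.List.mem_pyRange_one.2 ⟨h0, h1⟩
    have hpmem : p ∈ pos.getD (pvKmer cs k p) [] := by
      rw [← hpos] at hfil
      rw [hfil]
      exact List.mem_filter.2 ⟨hpR, by simp⟩
    obtain ⟨v, hv⟩ : ∃ v, pos.get? (pvKmer cs k p) = some v := by
      cases h : pos.get? (pvKmer cs k p) with
      | none =>
        exfalso
        rw [PySem.Dict.getD_eq_get?_getD, h] at hpmem
        simp at hpmem
      | some v => exact ⟨v, rfl⟩
    have hveq : v = pos.getD (pvKmer cs k p) [] := by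
      rw [PySem.Dict.getD_eq_get?_getD, hv]
      rfl
    refine ⟨(pvKmer cs k p, v), PySem.Dict.mem_items_of_get?_eq_some pos hv, ?_, p, ?_, ?_⟩
    · rw [PySem.List.len_eq]
      rw [hveq]
      rw [← hpos] at hfil
      rw [hfil]
      rw [hcnt] at h3
      exact h3
    · rw [hveq]
      exact hpmem
    · refine PySem.List.mem_pyRange_one.2 ⟨h4, lt_min h5 ?_⟩
      omega

-- every index ever set by A's marking loops is a valid mask index
theorem pv_items_bounds (cs : List Char) (k : Int) (n : Int) (hn : n = (cs.length : Int)) :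
    ∀ kp ∈ ((PySem.List.pyRange 0 (n - k + 1) 1).foldl (fun d i => d.modify (pvKmer cs k i) [] (fun l => l ++ [i])) PySem.Dict.empty).items,
      ∀ p ∈ kp.2, ∀ j ∈ PySem.List.pyRange p (min (p + k) n) 1, 0 ≤ j ∧ j < n := by
  intro kp hkp p hp j hj
  have hval : kp.2 = (PySem.List.pyRange 0 (n - k + 1) 1).filter (fun i => pvKmer cs k i == kp.1) := by
    have h := PySem.Dict.getD_of_mem_items _ (show (kp.1, kp.2) ∈ _ from hkp)
      (pv_nodup_positions cs k (PySem.List.pyRange 0 (n - k + 1) 1)) []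
    rw [pv_getD_positions] at h
    exact h.symm
  rw [hval] at hp
  have hpR := PySem.List.mem_pyRange_one.1 (List.mem_filter.1 hp).1
  have hjm := PySem.List.mem_pyRange_one.1 hj
  have hmin : min (p + k) n ≤ n := min_le_right _ _
  omega

-- ===== VERDICT (by name: the statement is the Claim_ definition above) =====
theorem find_repetitive_aa_regions_py_spec : Claim_equal_find_repetitive_aa_regions_py := by
  intro protein k min_hits _
  unfold Spec_find_repetitive_aa_regions_py
  rw [find_repetitive_aa_regions_py, find_repetitive_aa_regions_py_alt]
  set cs := protein.toList with hcs
  set n : Int := PySem.List.len cs with hn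
  have hnl : n = (cs.length : Int) := by rw [hn, PySem.List.len_eq]
  by_cases h1 : n < k
  · rw [if_pos h1, if_pos (Or.inr h1)]
  · rw [if_neg h1]
    have hmlen : ∀ (items : List (List Char × List Int)),
        (items.foldl (fun m kp => if min_hits ≤ PySem.List.len kp.2 then
          kp.2.foldl (fun m p => (PySem.List.pyRange p (min (p + k) n) 1).foldl (fun m j => PySem.List.pySetD m j true) m) m else m)
          (List.replicate n.toNat false)).length = n.toNat := by
      intro items
      rw [pv_outer_length]
      simp
    by_cases h2 : k < 1
    · rw [if_pos (Or.inl h2)]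
      refine Eq.trans (pv_scan_eq _ n (n.toNat + 1) 0 [] [] (by omega) (by simp) (by simp) ?_) (by simp)
      intro j hj0 hjn
      constructor
      · intro htrue
        exfalso
        rw [pv_pyGetD_getD _ _ hj0 (by rw [hmlen]; omega)] at htrue
        rw [pv_outer_getD] at htrue
        · rw [pv_getD_replicate] at htrue
          simp only [Bool.false_or, decide_eq_true_eq] at htrue
          obtain ⟨kp, _, _, p, _, hjmem⟩ := htrue
          have hjm := PySem.List.mem_pyRange_one.1 hjmem
          have hmin : min (p + k) n ≤ p + k := min_le_left _ _
          omega
        · intro kp _ p _ x hx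
          exfalso
          have hxm := PySem.List.mem_pyRange_one.1 hx
          have hmin : min (p + k) n ≤ p + k := min_le_left _ _
          omega
      · rintro ⟨r, hr, -⟩
        simp at hr
    · have hk : 1 ≤ k := by omega
      have hkn : k ≤ n := by omega
      rw [if_neg (show ¬ (k < 1 ∨ n < k) by omega)]
      set counts : PySem.Dict (List Char) Int :=
        PySem.Dict.counter ((PySem.List.pyRange 0 (n - k + 1) 1).map (fun i => pvKmer cs k i)) with hcounts
      set M0 : Nat := (n - k + 1).toNat with hM0
      have hM0cast : ((M0 : Nat) : Int) = n - k + 1 := by omega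
      have inv := pv_sweep_inv cs k min_hits counts hk M0
      rw [hM0cast] at inv
      obtain ⟨ihsep, ihgood, ihcov, -, -⟩ := inv
      set r := (PySem.List.pyRange 0 (n - k + 1) 1).foldl (pvStep k min_hits counts cs) ([], none) with hr
      have hB : (match r.2 with
          | some c => r.1 ++ [c]
          | none => r.1) = pvToL r := by
        cases h : r.2 <;> simp [pvToL, h]
      rw [hB]
      refine Eq.trans (pv_scan_eq _ n (n.toNat + 1) 0 [] (pvToL r) (by omega) ihsep ?_ ?_) (by simp)
      · intro q hq
        have := ihgood q hq
        exact ⟨by omega, this.2.1, by omega⟩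
      · intro j hj0 hjn
        rw [pv_pyGetD_getD _ _ hj0 (by rw [hmlen]; omega)]
        rw [pv_outer_getD]
        · rw [pv_getD_replicate]
          simp only [Bool.false_or, decide_eq_true_eq]
          rw [show ((j.toNat : Nat) : Int) = j by omega]
          rw [pv_maskpred cs k min_hits n hnl j]
          exact (ihcov j).symm
        · intro kp hkp p hp x hx
          have := pv_items_bounds cs k n hnl kp hkp p hp x hx
          simp only [List.length_replicate]
          omega
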